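-- pv_equiv track=rewrite | github.com/asovgir/source-export | main.py | get_all_columns
-- ===== SOURCE A (Python) =====
-- def get_all_columns(data_list):
--     """Get all unique column names from processed data"""
--     if not data_list:
--         return []
--
--     all_cols = set()
--     for row in data_list:
--         if isinstance(row, dict):
--             all_cols.update(row.keys())
--
--     # Sort with important columns first - propertyID should always be first
--     priority_cols = ['propertyID', 'data_type', 'sourceID', 'sourceName', 'roomtype_roomTypeID', 'roomtype_roomTypeName', 'room_roomID', 'room_roomName']
--     sorted_cols = []
--
--     for col in priority_cols:
--         if col in all_cols:
--             sorted_cols.append(col)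
--             all_cols.remove(col)
--
--     sorted_cols.extend(sorted(all_cols))
--     return sorted_cols
-- ===== SOURCE B (Python) =====
-- def get_all_columns(data_list):
--     """Get all unique column names from processed data"""
--     priority_cols = ['propertyID', 'data_type', 'sourceID', 'sourceName', 'roomtype_roomTypeID', 'roomtype_roomTypeName', 'room_roomID', 'room_roomName']
--     rank = {col: i for i, col in enumerate(priority_cols)}
--     all_cols = {key for row in data_list if isinstance(row, dict) for key in row}
--     return sorted(all_cols, key=lambda c: (rank.get(c, len(priority_cols)), c))
-- ===== Notes on version B (the rewrite author's own statement) =====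
-- stated objective: idiomatic
-- what changed: A's two-phase construction (loop over priority columns mutating the set, then sorted of the remainder) is replaced by one sorted call over the unique keys with a lexicographic key (rank.get(c, len(priority_cols)), c), the rank dict built once from the priority list.
import Mathlib
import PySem

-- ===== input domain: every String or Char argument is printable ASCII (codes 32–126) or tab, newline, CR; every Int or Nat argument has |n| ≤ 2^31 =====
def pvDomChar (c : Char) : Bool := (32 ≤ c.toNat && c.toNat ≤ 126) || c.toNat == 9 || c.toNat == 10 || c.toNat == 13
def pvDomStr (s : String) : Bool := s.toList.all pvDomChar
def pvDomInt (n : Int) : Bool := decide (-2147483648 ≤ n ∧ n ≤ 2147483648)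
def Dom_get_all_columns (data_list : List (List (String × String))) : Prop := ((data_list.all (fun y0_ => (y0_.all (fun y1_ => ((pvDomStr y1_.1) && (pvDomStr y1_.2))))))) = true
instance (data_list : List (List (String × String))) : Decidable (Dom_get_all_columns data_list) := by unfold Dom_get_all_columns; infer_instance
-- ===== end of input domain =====

-- B replaces A's priority loop that mutates the set by a single keyed sort:
-- sorted(all_cols, key=lambda c: (rank.get(c, len(priority_cols)), c)) — idiomatic, same cost.

-- ===== PORT A =====
def priorityColsA : List String :=
  ["propertyID", "data_type", "sourceID", "sourceName", "roomtype_roomTypeID",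
   "roomtype_roomTypeName", "room_roomID", "room_roomName"]

def get_all_columns (data_list : List (List (String × String))) : List String :=
  if data_list = [] then []
  else
    -- all_cols = set(); for row: all_cols.update(row.keys())  (every row here is a dict)
    let all_cols : PySem.Set String :=
      data_list.foldl (fun s row => PySem.Set.update s (PySem.Dict.ofList row).keys) PySem.Set.empty
    -- for col in priority_cols: if col in all_cols: sorted_cols.append(col); all_cols.remove(col)
    let st :=
      priorityColsA.foldl
        (fun (st : List String × PySem.Set String) col =>
          if PySem.Set.contains st.2 col then (st.1 ++ [col], PySem.Set.discard st.2 col) else st)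
        ([], all_cols)
    -- sorted_cols.extend(sorted(all_cols)); return sorted_cols
    st.1 ++ PySem.List.sorted st.2 (fun x => x) false

-- ===== PORT B =====
def priorityColsB : List String :=
  ["propertyID", "data_type", "sourceID", "sourceName", "roomtype_roomTypeID",
   "roomtype_roomTypeName", "room_roomID", "room_roomName"]

-- rank = {col: i for i, col in enumerate(priority_cols)}
def rankB : PySem.Dict String Int :=
  (PySem.List.enumerate priorityColsB 0).foldl (fun d p => PySem.Dict.insert d p.2 p.1) PySem.Dict.empty

def get_all_columns_alt (data_list : List (List (String × String))) : List String :=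
  -- all_cols = {key for row in data_list if isinstance(row, dict) for key in row}
  let all_cols : PySem.Set String :=
    PySem.Set.ofList (data_list.flatMap (fun row => (PySem.Dict.ofList row).keys))
  -- sorted(all_cols, key=lambda c: (rank.get(c, len(priority_cols)), c))
  PySem.List.sorted2 all_cols
    (fun c => PySem.Dict.getD rankB c (priorityColsB.length : Int)) (fun c => c) false

-- ===== PRECONDITION & SPEC =====
def Spec_get_all_columns (data_list : List (List (String × String))) (out : List String) : Prop := out = get_all_columns_alt data_list
instance (data_list : List (List (String × String))) (out : List String) : Decidable (Spec_get_all_columns data_list out) := by unfold Spec_get_all_columns; infer_instance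

-- ===== CLAIM (what is proved, stated in full; the proofs are below) =====
def Claim_equal_get_all_columns : Prop := ∀ (data_list : List (List (String × String))), Dom_get_all_columns data_list → Spec_get_all_columns data_list (get_all_columns data_list)

-- ===== LEMMAS AND PROOFS =====

-- the key B sorts by, read as one lexicographic pair
def keyB (c : String) : Lex (Int × String) :=
  toLex (PySem.Dict.getD rankB c (priorityColsB.length : Int), c)

-- the rank default (= len(priority_cols) = 8) fires exactly off the priority list
theorem rank_not_mem (c : String) (hc : c ∉ priorityColsB) :
    PySem.Dict.getD rankB c (priorityColsB.length : Int) = 8 := by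
  simp [priorityColsB] at hc
  obtain ⟨h1,h2,h3,h4,h5,h6,h7,h8⟩ := hc
  simp [rankB, priorityColsB, PySem.List.enumerate, PySem.Dict.getD, PySem.Dict.get?,
    PySem.Dict.insert, PySem.Dict.empty, List.find?,
    beq_eq_false_iff_ne.2 (Ne.symm h1), beq_eq_false_iff_ne.2 (Ne.symm h2),
    beq_eq_false_iff_ne.2 (Ne.symm h3), beq_eq_false_iff_ne.2 (Ne.symm h4),
    beq_eq_false_iff_ne.2 (Ne.symm h5), beq_eq_false_iff_ne.2 (Ne.symm h6),
    beq_eq_false_iff_ne.2 (Ne.symm h7), beq_eq_false_iff_ne.2 (Ne.symm h8)]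

-- Python's tuple-key sort is the sort by the lexicographic pair key
theorem sorted2_eq_sorted_toLex {α κ₁ κ₂ : Type} [LinearOrder κ₁] [LinearOrder κ₂]
    (xs : List α) (k1 : α → κ₁) (k2 : α → κ₂) :
    PySem.List.sorted2 xs k1 k2 false
      = PySem.List.sorted xs (fun x => toLex (k1 x, k2 x)) false := by
  have hb : (fun a b : α => decide (k1 a < k1 b) || (!decide (k1 b < k1 a) && decide (k2 a < k2 b)))
      = (fun a b : α => decide ((fun x => toLex (k1 x, k2 x)) a < (fun x => toLex (k1 x, k2 x)) b)) := by
    funext a b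
    simp only [Prod.Lex.toLex_lt_toLex]
    by_cases h : k1 a < k1 b
    · simp [h]
    · by_cases h' : k1 b < k1 a
      · have hne : k1 a ≠ k1 b := fun he => absurd (he ▸ h') (lt_irrefl _)
        simp [h, h', hne]
      · have he : k1 a = k1 b := le_antisymm (not_lt.1 h') (not_lt.1 h)
        simp [he]
  show List.foldl (fun acc x => PySem.List.insertBy _ x acc) [] xs
     = List.foldl (fun acc x => PySem.List.insertBy _ x acc) [] xs
  rw [hb]

-- A's priority loop, characterised: it filters the priority list and filters the set
theorem foldl_priority (ps : List String) (hps : ps.Nodup) (acc : List String) (S : List String) :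
    ps.foldl
      (fun (st : List String × PySem.Set String) col =>
        if PySem.Set.contains st.2 col then (st.1 ++ [col], PySem.Set.discard st.2 col) else st)
      (acc, S)
    = (acc ++ ps.filter (fun c => decide (c ∈ S)), S.filter (fun x => decide (x ∉ ps))) := by
  induction ps generalizing acc S with
  | nil => simp
  | cons p t ih =>
    obtain ⟨hpt, ht⟩ := List.nodup_cons.1 hps
    simp only [List.foldl_cons]
    by_cases hp : p ∈ S
    · rw [if_pos ((PySem.Set.contains_iff S p).2 hp)]
      rw [ih ht]
      refine Prod.ext ?_ ?_
      · show acc ++ [p] ++ _ = _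
        rw [List.filter_congr (q := fun c => decide (c ∈ S))
            (fun x hx => by
              have hxp : x ≠ p := fun h => hpt (h ▸ hx)
              simp [PySem.Set.mem_discard, hxp])]
        simp [hp]
      · show List.filter _ (PySem.Set.discard S p) = _
        show List.filter _ (List.filter (fun y => !y == p) S) = _
        rw [List.filter_filter]
        refine List.filter_congr (fun x hx => ?_)
        by_cases hxp : x = p <;> simp [hxp]
    · rw [if_neg (fun h => hp ((PySem.Set.contains_iff S p).1 h))]
      rw [ih ht]
      refine Prod.ext ?_ ?_
      · simp [fun h : p ∈ S => hp h]
      · refine List.filter_congr (fun x hx => ?_)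
        have hxp : x ≠ p := fun h => hp (h ▸ hx)
        simp [hxp]

theorem main_eq (data_list : List (List (String × String))) :
    get_all_columns data_list = get_all_columns_alt data_list := by
  by_cases hnil : data_list = []
  · subst hnil; rfl
  · unfold get_all_columns get_all_columns_alt
    rw [if_neg hnil]
    have hfold : data_list.foldl (fun s row => PySem.Set.update s (PySem.Dict.ofList row).keys)
        PySem.Set.empty
        = PySem.Set.ofList (data_list.flatMap (fun row => (PySem.Dict.ofList row).keys)) := by
      simp [PySem.Set.ofList, PySem.Set.update, List.foldl_flatMap]
    rw [hfold]
    set S : List String := PySem.Set.ofList (data_list.flatMap (fun row => (PySem.Dict.ofList row).keys)) with hSdef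
    have hSnodup : S.Nodup := PySem.Set.nodup_ofList _
    show (priorityColsA.foldl
        (fun (st : List String × PySem.Set String) col =>
          if PySem.Set.contains st.2 col then (st.1 ++ [col], PySem.Set.discard st.2 col) else st)
        ([], S)).1
      ++ PySem.List.sorted (priorityColsA.foldl
        (fun (st : List String × PySem.Set String) col =>
          if PySem.Set.contains st.2 col then (st.1 ++ [col], PySem.Set.discard st.2 col) else st)
        ([], S)).2 (fun x => x) false
      = PySem.List.sorted2 S (fun c => PySem.Dict.getD rankB c (priorityColsB.length : Int)) (fun c => c) false
    rw [foldl_priority priorityColsA (by decide) [] S]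
    rw [sorted2_eq_sorted_toLex]
    simp only [List.nil_append]
    set P := priorityColsA with hP
    set ys := P.filter (fun c => decide (c ∈ S))
        ++ PySem.List.sorted (S.filter (fun x => decide (x ∉ P))) (fun x => x) false with hys
    have hrest_perm : (PySem.List.sorted (S.filter (fun x => decide (x ∉ P))) (fun x => x) false).Perm
        (S.filter (fun x => decide (x ∉ P))) := PySem.List.sorted_perm _ _ _
    have hperm : ys.Perm S := by
      have h1 : (P.filter (fun c => decide (c ∈ S))).Perm (S.filter (fun x => decide (x ∈ P))) := by
        refine (List.perm_ext_iff_of_nodup (List.Nodup.filter _ (by decide)) (List.Nodup.filter _ hSnodup)).2 ?_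
        intro a; simp [List.mem_filter, and_comm]
      refine (h1.append hrest_perm).trans ?_
      have := List.filter_append_perm (fun x => decide (x ∈ P)) S
      simpa [decide_not] using this
    have hranksP : P.Pairwise (fun a b =>
        PySem.Dict.getD rankB a (priorityColsB.length : Int)
          < PySem.Dict.getD rankB b (priorityColsB.length : Int)) := by decide
    have hlt8 : ∀ a ∈ P, PySem.Dict.getD rankB a (priorityColsB.length : Int) < 8 := by decide
    have hnotinA_B : ∀ x : String, x ∉ P → x ∉ priorityColsB := fun x h => h
    have hpair : ys.Pairwise (fun a b => keyB a < keyB b) := by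
      rw [hys]
      refine List.pairwise_append.2 ⟨?_, ?_, ?_⟩
      · refine List.Pairwise.imp ?_ (List.Pairwise.sublist List.filter_sublist hranksP)
        intro a b hab
        exact Prod.Lex.toLex_lt_toLex.2 (Or.inl hab)
      · have hle := PySem.List.sorted_pairwise (S.filter (fun x => decide (x ∉ P))) (fun x : String => x)
        have hnd : (PySem.List.sorted (S.filter (fun x => decide (x ∉ P))) (fun x : String => x) false).Nodup :=
          hrest_perm.nodup_iff.2 (List.Nodup.filter _ hSnodup)
        have hne : (PySem.List.sorted (S.filter (fun x => decide (x ∉ P))) (fun x : String => x) false).Pairwise (fun a b => a ≠ b) := hnd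
        refine List.Pairwise.imp_of_mem ?_ (hle.and hne)
        intro a b ha hb hab
        have ha' : a ∉ P := by
          have := (PySem.List.mem_sorted _ _ _ _).1 ha
          simpa using (List.mem_filter.1 this).2
        have hb' : b ∉ P := by
          have := (PySem.List.mem_sorted _ _ _ _).1 hb
          simpa using (List.mem_filter.1 this).2
        refine Prod.Lex.toLex_lt_toLex.2 (Or.inr ⟨?_, lt_of_le_of_ne hab.1 hab.2⟩)
        rw [rank_not_mem a (hnotinA_B a ha'), rank_not_mem b (hnotinA_B b hb')]
      · intro a ha b hb
        have haP : a ∈ P := (List.mem_filter.1 ha).1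
        have hb' : b ∉ P := by
          have := (PySem.List.mem_sorted _ _ _ _).1 hb
          simpa using (List.mem_filter.1 this).2
        refine Prod.Lex.toLex_lt_toLex.2 (Or.inl ?_)
        rw [rank_not_mem b (hnotinA_B b hb')]
        exact hlt8 a haP
    exact (PySem.List.sorted_eq_of_perm_of_pairwise_lt S ys keyB hperm hpair).symm

-- ===== VERDICT (by name: the statement is the Claim_ definition above) =====
theorem get_all_columns_spec : Claim_equal_get_all_columns := by
  intro d _
  unfold Spec_get_all_columns
  exact main_eq d
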